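-- pv_equiv track=rewrite | github.com/PixVenom/LAWGORITHM | backend/services/summarization_service.py | _create_plain_language_summary
-- ===== SOURCE A (Python) =====
-- def _create_plain_language_summary(base_summary: str) -> str:
--     """
--     Create a plain language version of the summary
--     """
--     # Remove complex legal jargon and make it more readable
--     plain = base_summary
--
--     # Replace complex terms with simpler ones
--     replacements = {
--         'hereinafter': 'from now on',
--         'whereas': 'since',
--         'notwithstanding': 'despite',
--         'pursuant to': 'according to',
--         'in accordance with': 'following',
--         'subject to': 'depending on',
--         'provided that': 'as long as',
--         'in the event that': 'if',
--         'shall be deemed': 'will be considered',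
--         'without prejudice to': 'without affecting'
--     }
--
--     for complex_term, simple_term in replacements.items():
--         plain = plain.replace(complex_term, simple_term)
--
--     return plain
-- ===== SOURCE B (Python) =====
-- def _create_plain_language_summary(base_summary: str) -> str:
--     """
--     Create a plain language version of the summary
--     """
--     replacements = [
--         ('hereinafter', 'from now on'),
--         ('whereas', 'since'),
--         ('notwithstanding', 'despite'),
--         ('pursuant to', 'according to'),
--         ('in accordance with', 'following'),
--         ('subject to', 'depending on'),
--         ('provided that', 'as long as'),
--         ('in the event that', 'if'),
--         ('shall be deemed', 'will be considered'),
--         ('without prejudice to', 'without affecting'),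
--     ]
--
--     def go(text, items):
--         if not items:
--             return text
--         complex_term, simple_term = items[0]
--         return go(simple_term.join(text.split(complex_term)), items[1:])
--
--     return go(base_summary, replacements)
-- ===== Notes on version B (the rewrite author's own statement) =====
-- stated objective: alternative
-- what changed: Replaces the imperative dict loop of in-place str.replace passes by a recursion over a list of pairs that rewrites each term via split-on-term/join-with-replacement, computing the fragment list explicitly instead of mutating a string variable.
import Mathlib
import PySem

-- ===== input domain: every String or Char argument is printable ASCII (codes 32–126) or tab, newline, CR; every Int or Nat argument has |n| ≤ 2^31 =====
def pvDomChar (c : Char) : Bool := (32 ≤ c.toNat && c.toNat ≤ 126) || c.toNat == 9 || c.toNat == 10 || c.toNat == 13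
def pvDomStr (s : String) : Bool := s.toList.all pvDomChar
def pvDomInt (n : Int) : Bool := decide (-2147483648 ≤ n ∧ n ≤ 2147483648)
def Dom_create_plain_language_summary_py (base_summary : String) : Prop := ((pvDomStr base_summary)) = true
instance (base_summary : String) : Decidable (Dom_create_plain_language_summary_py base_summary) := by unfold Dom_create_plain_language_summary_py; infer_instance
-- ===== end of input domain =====

-- B rewrites each jargon term by split-on-term / join-with-replacement in a recursion over a pair
-- list, instead of A's imperative dict loop of str.replace passes (alternative decomposition, same cost).

-- ===== PORT A =====
def pvReplacementsDict : PySem.Dict String String :=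
  PySem.Dict.ofList
    [("hereinafter", "from now on"), ("whereas", "since"), ("notwithstanding", "despite"),
     ("pursuant to", "according to"), ("in accordance with", "following"),
     ("subject to", "depending on"), ("provided that", "as long as"),
     ("in the event that", "if"), ("shall be deemed", "will be considered"),
     ("without prejudice to", "without affecting")]

def create_plain_language_summary_py (base_summary : String) : String :=
  pvReplacementsDict.items.foldl
    (fun plain p => PySem.Str.replace plain p.1 p.2) base_summary

-- ===== PORT B =====
-- pvSplit s sep = s.split(sep): exact for nonempty sep (every separator below is a nonempty literal)
def pvSplit (s sep : String) : List String :=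
  (PySem.Chars.splitOn s.toList sep.toList).map String.ofList

def pvTable : List (String × String) :=
  [("hereinafter", "from now on"), ("whereas", "since"), ("notwithstanding", "despite"),
   ("pursuant to", "according to"), ("in accordance with", "following"),
   ("subject to", "depending on"), ("provided that", "as long as"),
   ("in the event that", "if"), ("shall be deemed", "will be considered"),
   ("without prejudice to", "without affecting")]

def pvApplyAll : String → List (String × String) → String
  | text, [] => text
  | text, (complexTerm, simpleTerm) :: rest =>
      pvApplyAll (PySem.Str.join simpleTerm (pvSplit text complexTerm)) rest

def create_plain_language_summary_py_alt (base_summary : String) : String :=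
  pvApplyAll base_summary pvTable

-- ===== PRECONDITION & SPEC =====
def Spec_create_plain_language_summary_py (base_summary : String) (out : String) : Prop := out = create_plain_language_summary_py_alt base_summary
instance (base_summary : String) (out : String) : Decidable (Spec_create_plain_language_summary_py base_summary out) := by unfold Spec_create_plain_language_summary_py; infer_instance

-- ===== CLAIM (what is proved, stated in full; the proofs are below) =====
def Claim_equal_create_plain_language_summary_py : Prop := ∀ (base_summary : String), Dom_create_plain_language_summary_py base_summary → Spec_create_plain_language_summary_py base_summary (create_plain_language_summary_py base_summary)

-- ===== LEMMAS AND PROOFS =====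

-- one-step reduction equations for the two PySem fuel loops (all definitional)
lemma pvRepGo0 (old new l acc : List Char) :
    PySem.Chars.replace.go old new 0 l acc = acc.reverse ++ l := rfl

lemma pvRepGoNil (old new acc : List Char) (f : Nat) :
    PySem.Chars.replace.go old new (f + 1) [] acc = acc.reverse := rfl

lemma pvRepGoCons (old new : List Char) (f : Nat) (c : Char) (t acc : List Char) :
    PySem.Chars.replace.go old new (f + 1) (c :: t) acc =
      if old.isPrefixOf (c :: t) then
        PySem.Chars.replace.go old new f (List.drop old.length (c :: t)) (new.reverse ++ acc)
      else PySem.Chars.replace.go old new f t (c :: acc) := rfl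

lemma pvSplGo0 (old l cur : List Char) (acc : List (List Char)) :
    PySem.Chars.splitOn.go old 0 l cur acc = ((cur.reverse ++ l) :: acc).reverse := rfl

lemma pvSplGoNil (old cur : List Char) (acc : List (List Char)) (f : Nat) :
    PySem.Chars.splitOn.go old (f + 1) [] cur acc = (cur.reverse :: acc).reverse := rfl

lemma pvSplGoCons (old : List Char) (f : Nat) (c : Char) (t cur : List Char) (acc : List (List Char)) :
    PySem.Chars.splitOn.go old (f + 1) (c :: t) cur acc =
      if old.isPrefixOf (c :: t) then
        PySem.Chars.splitOn.go old f (List.drop old.length (c :: t)) [] (cur.reverse :: acc)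
      else PySem.Chars.splitOn.go old f t (c :: cur) acc := rfl

-- intercalate bookkeeping for the accumulator invariant
lemma pvInterCons (sep a b : List Char) (l : List (List Char)) :
    sep.intercalate (a :: b :: l) = a ++ sep ++ sep.intercalate (b :: l) := by
  simp [List.intercalate, List.intersperse]

lemma pvInterSnoc (sep q : List Char) :
    ∀ (xs : List (List Char)), xs ≠ [] →
      sep.intercalate (xs ++ [q]) = sep.intercalate xs ++ sep ++ q := by
  intro xs
  induction xs with
  | nil => intro h; exact absurd rfl h
  | cons x t ih =>
    intro _
    cases t with
    | nil => simp [List.intercalate, List.intersperse]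
    | cons y ys =>
      have h2 := ih (by simp)
      rw [List.cons_append] at h2
      rw [List.cons_append, List.cons_append, pvInterCons sep x y (ys ++ [q]), h2, pvInterCons]
      simp [List.append_assoc]

lemma pvInterExtendLast (sep ys zs : List Char) :
    ∀ (xs : List (List Char)),
      sep.intercalate (xs ++ [ys ++ zs]) = sep.intercalate (xs ++ [ys]) ++ zs := by
  intro xs
  cases xs with
  | nil => simp [List.intercalate]
  | cons x t =>
    rw [pvInterSnoc sep (ys ++ zs) (x :: t) (by simp), pvInterSnoc sep ys (x :: t) (by simp)]
    simp [List.append_assoc]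

-- lockstep invariant: replacing with `new` equals splitting then intercalating with `new`
lemma pvGoLockstep (old new : List Char) (hold : old ≠ []) :
    ∀ n (l cur accR : List Char) (acc : List (List Char)) (fuel1 fuel2 : Nat),
      l.length = n → l.length ≤ fuel1 → l.length ≤ fuel2 →
      accR.reverse = new.intercalate (acc.reverse ++ [cur.reverse]) →
      PySem.Chars.replace.go old new fuel2 l accR
        = new.intercalate (PySem.Chars.splitOn.go old fuel1 l cur acc) := by
  intro n
  induction n using Nat.strong_induction_on with
  | _ n ih =>
    intro l cur accR acc fuel1 fuel2 hn h1 h2 hinv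
    have hol : 1 ≤ old.length := List.length_pos_iff.mpr hold
    cases l with
    | nil =>
      cases fuel1 <;> cases fuel2 <;>
        simp only [pvRepGo0, pvRepGoNil, pvSplGo0, pvSplGoNil, List.append_nil,
          List.reverse_cons] <;> exact hinv
    | cons c t =>
      subst hn
      cases fuel1 with
      | zero => simp at h1
      | succ f1 =>
        cases fuel2 with
        | zero => simp at h2
        | succ f2 =>
          rw [pvRepGoCons, pvSplGoCons]
          by_cases hp : old.isPrefixOf (c :: t) = true
          · rw [if_pos hp, if_pos hp]
            refine ih (List.drop old.length (c :: t)).length ?_ _ _ _ _ _ _ rfl ?_ ?_ ?_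
            · simp only [List.length_drop, List.length_cons]; omega
            · simp only [List.length_drop]; simp only [List.length_cons] at h1 ⊢; omega
            · simp only [List.length_drop]; simp only [List.length_cons] at h2 ⊢; omega
            · rw [List.reverse_append, List.reverse_reverse, List.reverse_cons, List.reverse_nil]
              rw [pvInterSnoc new [] (acc.reverse ++ [cur.reverse]) (by simp), ← hinv]
              simp
          · rw [if_neg hp, if_neg hp]
            refine ih t.length ?_ _ _ _ _ _ _ rfl ?_ ?_ ?_
            · simp only [List.length_cons]; omega
            · simp only [List.length_cons] at h1; omega
            · simp only [List.length_cons] at h2; omega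
            · rw [List.reverse_cons, List.reverse_cons,
                pvInterExtendLast new cur.reverse [c] acc.reverse, ← hinv]

lemma pvJoinSplit (s old new : List Char) (h : old ≠ []) :
    PySem.Chars.join new (PySem.Chars.splitOn s old) = PySem.Chars.replace s old new := by
  have hIsE : old.isEmpty = false := by simp [h]
  show new.intercalate (PySem.Chars.splitOn.go old (s.length + 1) s [] [])
      = PySem.Chars.replace s old new
  rw [PySem.Chars.replace, hIsE]
  simp only [Bool.false_eq_true, if_false]
  exact (pvGoLockstep old new h s.length s [] [] [] (s.length + 1) s.length rfl
    (by omega) (le_refl _) (by simp [List.intercalate])).symm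

lemma pvStep (s k v : String) (hk : k.toList ≠ []) :
    PySem.Str.join v (pvSplit s k) = PySem.Str.replace s k v := by
  apply String.toList_inj.mp
  rw [PySem.Str.toList_join, PySem.Str.toList_replace, pvSplit, List.map_map]
  have hmap : (String.toList ∘ String.ofList) = id := by
    funext cs; simp
  rw [hmap, List.map_id]
  exact pvJoinSplit s.toList k.toList v.toList hk

lemma pvFold :
    ∀ (ps : List (String × String)) (s : String), (∀ p ∈ ps, p.1.toList ≠ []) →
      ps.foldl (fun plain p => PySem.Str.replace plain p.1 p.2) s = pvApplyAll s ps := by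
  intro ps
  induction ps with
  | nil => intro s _; rfl
  | cons p rest ih =>
    intro s h
    obtain ⟨k, v⟩ := p
    show rest.foldl _ (PySem.Str.replace s k v) = pvApplyAll (PySem.Str.join v (pvSplit s k)) rest
    rw [pvStep s k v (h (k, v) (by simp))]
    exact ih _ (fun q hq => h q (by simp [hq]))

-- ===== VERDICT (by name: the statement is the Claim_ definition above) =====
theorem create_plain_language_summary_py_spec : Claim_equal_create_plain_language_summary_py := by
  intro s _
  unfold Spec_create_plain_language_summary_py create_plain_language_summary_py
    create_plain_language_summary_py_alt
  rw [show pvReplacementsDict.items = pvTable from by decide]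
  exact pvFold pvTable s (by decide)
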